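-- pv_equiv track=rewrite | github.com/aranventura/TechTest | ApiCode/main.py | repeated_numbers
-- ===== SOURCE A (Python) =====
-- def repeated_numbers(str):
--     numeros_vistos = set()
--     for caracter in str:
--         if caracter.isdigit():
--             if caracter in numeros_vistos:
--                 return True
--             numeros_vistos.add(caracter)
--     return False
-- ===== SOURCE B (Python) =====
-- def repeated_numbers(str):
--     digits = [c for c in str if c.isdigit()]
--     return len(digits) != len(set(digits))
-- ===== Notes on version B (the rewrite author's own statement) =====
-- stated objective: simpler
-- what changed: Replaces the incremental seen-set loop with an early return by filtering out all digit characters once and comparing the list's length with its set's cardinality.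
import Mathlib
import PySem

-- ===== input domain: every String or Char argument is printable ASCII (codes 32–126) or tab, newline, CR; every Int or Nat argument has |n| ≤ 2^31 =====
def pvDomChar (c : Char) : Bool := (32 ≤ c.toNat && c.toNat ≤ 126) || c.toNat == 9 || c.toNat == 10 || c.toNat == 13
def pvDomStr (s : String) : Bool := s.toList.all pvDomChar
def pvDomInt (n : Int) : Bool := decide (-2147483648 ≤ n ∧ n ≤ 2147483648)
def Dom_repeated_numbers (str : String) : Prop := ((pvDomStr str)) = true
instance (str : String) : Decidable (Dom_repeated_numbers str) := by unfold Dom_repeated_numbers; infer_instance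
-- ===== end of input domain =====

-- B replaces A's incremental seen-set loop with early return by a filter-all-digits
-- pass then a length-vs-set-cardinality comparison (objective: simpler).


-- ===== PORT A =====
-- loop 'for caracter in str' with the early 'return True' as structural recursion
def repeatedNumbersLoop : List Char → PySem.Set Char → Bool
  | [], _ => false
  | c :: rest, seen =>
    if PySem.Chars.isdigit c then
      if PySem.Set.contains seen c then true
      else repeatedNumbersLoop rest (PySem.Set.add seen c)
    else repeatedNumbersLoop rest seen

def repeated_numbers (str : String) : Bool :=
  repeatedNumbersLoop str.toList PySem.Set.empty

-- ===== PORT B =====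
def repeated_numbers_alt (str : String) : Bool :=
  let digits := str.toList.filter PySem.Chars.isdigit
  decide (digits.length ≠ (PySem.Set.ofList digits).length)

-- ===== PRECONDITION & SPEC =====
def Spec_repeated_numbers (str : String) (out : Bool) : Prop := out = repeated_numbers_alt str
instance (str : String) (out : Bool) : Decidable (Spec_repeated_numbers str out) := by unfold Spec_repeated_numbers; infer_instance

-- ===== CLAIM (what is proved, stated in full; the proofs are below) =====
def Claim_equal_repeated_numbers : Prop := ∀ (str : String), Dom_repeated_numbers str → Spec_repeated_numbers str (repeated_numbers str)

-- ===== LEMMAS AND PROOFS =====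

-- set(xs) (first occurrences) is a sublist of xs
theorem pv_ofList_sublist {α : Type} [BEq α] [LawfulBEq α] (xs : List α) :
    (PySem.Set.ofList xs).Sublist xs := by
  induction xs with
  | nil => simp [PySem.Set.ofList_nil]
  | cons x xs ih =>
    rw [PySem.Set.ofList_cons]
    refine List.Sublist.cons₂ x (List.Sublist.trans ?_ ih)
    simp only [PySem.Set.discard]
    exact List.filter_sublist

-- len(xs) = len(set(xs)) iff xs has no duplicates
theorem pv_length_ofList_eq_iff {α : Type} [BEq α] [LawfulBEq α] (xs : List α) :
    xs.length = (PySem.Set.ofList xs).length ↔ xs.Nodup := by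
  constructor
  · intro h
    have := (pv_ofList_sublist xs).eq_of_length h.symm
    rw [← this]
    exact PySem.Set.nodup_ofList xs
  · intro h
    rw [PySem.Set.ofList_eq_self_of_nodup xs h]

-- A's loop decides whether seen ++ (digits of l) contains a duplicate
theorem pv_loop_eq (l : List Char) (seen : List Char) (h : seen.Nodup) :
    repeatedNumbersLoop l seen = !decide ((seen ++ l.filter PySem.Chars.isdigit).Nodup) := by
  induction l generalizing seen with
  | nil => simp [repeatedNumbersLoop, h]
  | cons c rest ih =>
    by_cases hd : PySem.Chars.isdigit c
    · by_cases hc : c ∈ seen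
      · have hnd : ¬ (seen ++ c :: rest.filter PySem.Chars.isdigit).Nodup := fun hn =>
          (List.disjoint_of_nodup_append hn) hc (by simp)
        simp [repeatedNumbersLoop, hd, hc, hnd]
      · have hcon : PySem.Set.contains seen c = false := by
          rw [← Bool.not_eq_true]
          intro hx
          exact hc ((PySem.Set.contains_iff seen c).1 hx)
        have hadd : PySem.Set.add seen c = seen ++ [c] := by
          simp only [PySem.Set.add, hcon, Bool.false_eq_true, if_false]
        have hn2 : (seen ++ [c]).Nodup := by
          simp [List.nodup_append, h]
          exact fun a ha hac => hc (hac ▸ ha)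
        have hflt : seen ++ [c] ++ rest.filter PySem.Chars.isdigit
            = seen ++ (c :: rest).filter PySem.Chars.isdigit := by
          simp [List.filter_cons_of_pos hd]
        rw [repeatedNumbersLoop, hd, if_pos rfl, hcon, if_neg (by simp), hadd,
            ih _ hn2, hflt]
    · rw [repeatedNumbersLoop, if_neg (by simp [hd]), ih _ h]
      congr 2
      simp [hd]

-- ===== VERDICT (by name: the statement is the Claim_ definition above) =====
theorem repeated_numbers_spec : Claim_equal_repeated_numbers := by
  intro str _
  unfold Spec_repeated_numbers
  show repeatedNumbersLoop str.toList [] = repeated_numbers_alt str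
  rw [pv_loop_eq _ _ List.nodup_nil]
  simp [repeated_numbers_alt, pv_length_ofList_eq_iff]
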